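-- pv_equiv track=rewrite | github.com/Phabes/Algorithms_and_Data_Structures | ZESTAWY/ZESTAW_9/zad2.py | goodStart
-- ===== SOURCE A (Python) =====
-- class Node():
--   def __init__(self, number):
--     self.number = number
--     self.visited = False
--
-- def DFSVisit(G, vertexes, v):
--   n = len(vertexes)
--   v.visited = True
--   for i in range(n):
--     if G[v.number][i] > 0 and not vertexes[i].visited:
--       DFSVisit(G, vertexes, vertexes[i])
--
-- def goodStart(G):
--   n = len(G)
--   vertexes = [Node(i) for i in range(n)]
--   for i in range(n):
--     DFSVisit(G, vertexes, vertexes[i])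
--     check=True
--     for v in vertexes:
--       if not v.visited:
--         check=False
--       v.visited = False
--     if check:
--       return i
--   return None
--
-- G = [
--   [0, 0, 0, 0, 0],
--   [1, 0, 1, 0, 0],
--   [0, 0, 0, 0, 0],
--   [1, 1, 0, 0, 1],
--   [0, 0, 0, 0, 0]
-- ]
-- ===== SOURCE B (Python) =====
-- def goodStart(G):
--     n = len(G)
--     for s in range(n):
--         seen = [False] * n
--         seen[s] = True
--         frontier = [s]
--         while frontier:
--             nxt = []
--             for u in frontier:
--                 row = G[u]
--                 for j in range(n):
--                     if row[j] > 0 and not seen[j]: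
--                         seen[j] = True
--                         nxt.append(j)
--             frontier = nxt
--         if all(seen):
--             return s
--     return None
-- ===== Notes on version B (the rewrite author's own statement) =====
-- stated objective: alternative
-- what changed: Replaces the n recursive DFS traversals over mutable Node objects by n iterative frontier-based BFS passes over a boolean seen-array (no recursion, no vertex objects); same first-index-that-reaches-all result.
import Mathlib
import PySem

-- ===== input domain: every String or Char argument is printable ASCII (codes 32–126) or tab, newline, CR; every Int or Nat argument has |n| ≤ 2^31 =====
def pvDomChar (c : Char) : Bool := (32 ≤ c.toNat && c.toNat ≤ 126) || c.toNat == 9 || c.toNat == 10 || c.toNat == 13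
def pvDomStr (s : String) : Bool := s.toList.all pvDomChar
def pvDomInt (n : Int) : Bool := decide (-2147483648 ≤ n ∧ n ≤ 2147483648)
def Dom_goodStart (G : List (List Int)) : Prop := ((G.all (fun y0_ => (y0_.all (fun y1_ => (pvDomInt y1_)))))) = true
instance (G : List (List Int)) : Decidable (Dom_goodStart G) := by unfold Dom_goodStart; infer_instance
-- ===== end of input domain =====

-- B replaces A's n recursive DFS traversals over mutable Node objects by n iterative
-- frontier-based BFS passes over a boolean seen-list (objective: alternative, same O(n^3) cost).

-- shared small helpers (index reads with Python-in-range semantics; in-range under Pre_)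
def visG (s : List Bool) (j : Nat) : Bool := s.getD j false
def adjG (G : List (List Int)) (u j : Nat) : Bool := decide (0 < (G.getD u []).getD j 0)

-- ===== PORT A =====
-- A's recursive DFSVisit; the fuel argument only makes the Python recursion total
-- (fuel n+1 is provably never exhausted: each nested call marks a fresh vertex).
mutual
def dfsA (G : List (List Int)) : Nat → List Bool → Nat → List Bool
  | 0, vis, _ => vis
  | f+1, vis, v => dfsLoopA G f v (List.range G.length) (vis.set v true)
  termination_by f _ _ => (f, 0, 0)
def dfsLoopA (G : List (List Int)) (f : Nat) (v : Nat) : List Nat → List Bool → List Bool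
  | [], vis => vis
  | i :: rest, vis =>
      dfsLoopA G f v rest
        (if adjG G v i && !visG vis i then dfsA G f vis i else vis)
  termination_by l _ => (f, 1, l.length)
end

def goA (G : List (List Int)) : List Nat → Option Int
  | [] => none
  | i :: rest =>
      if (dfsA G (G.length + 1) (List.replicate G.length false) i).all (fun b => b)
      then some (Int.ofNat i) else goA G rest

def goodStart (G : List (List Int)) : Option Int := goA G (List.range G.length)

-- ===== PORT B =====
-- Source B: per start vertex an iterative BFS with a frontier list; the fuel argument only
-- makes the Python while-loop total (fuel n+1 is provably never exhausted).
def stepB (G : List (List Int)) (u : Nat) (st : List Bool × List Nat) (j : Nat) : List Bool × List Nat :=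
  if adjG G u j && !visG st.1 j then (st.1.set j true, st.2 ++ [j]) else st

def innerB (G : List (List Int)) (st : List Bool × List Nat) (u : Nat) : List Bool × List Nat :=
  (List.range G.length).foldl (stepB G u) st

def bfsRound (G : List (List Int)) (frontier : List Nat) (seen : List Bool) : List Bool × List Nat :=
  frontier.foldl (innerB G) (seen, [])

def bfsB (G : List (List Int)) : Nat → List Bool → List Nat → List Bool
  | _, seen, [] => seen
  | 0, seen, _ :: _ => seen
  | f+1, seen, u :: rest =>
      let st := bfsRound G (u :: rest) seen
      bfsB G f st.1 st.2

def goB (G : List (List Int)) : List Nat → Option Int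
  | [] => none
  | s :: rest =>
      if (bfsB G (G.length + 1) ((List.replicate G.length false).set s true) [s]).all (fun b => b)
      then some (Int.ofNat s) else goB G rest

def goodStart_alt (G : List (List Int)) : Option Int := goB G (List.range G.length)

-- ===== PRECONDITION & SPEC =====
-- Pre_: Python A raises IndexError exactly when some row is shorter than len(G)
-- (every returning run reads every row of every visited vertex up to index n-1).
def Pre_goodStart (G : List (List Int)) : Prop := ∀ row ∈ G, G.length ≤ row.length
instance (G : List (List Int)) : Decidable (Pre_goodStart G) := by unfold Pre_goodStart; infer_instance
def pvWitness_goodStart : List (List Int) := [[0, 1], [1, 0]]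

def Spec_goodStart (G : List (List Int)) (out : Option Int) : Prop := out = goodStart_alt G
instance (G : List (List Int)) (out : Option Int) : Decidable (Spec_goodStart G out) := by unfold Spec_goodStart; infer_instance

-- ===== CLAIM (what is proved, stated in full; the proofs are below) =====
def Claim_equal_goodStart : Prop := ∀ (G : List (List Int)), Dom_goodStart G → Pre_goodStart G → Spec_goodStart G (goodStart G)

-- ===== LEMMAS AND PROOFS =====

-- proof-only notions: pointwise inclusion of visited lists, count of unvisited,
-- "all neighbours of u marked", and reachability along positive edges
def SubV (s t : List Bool) : Prop := ∀ j, visG s j = true → visG t j = true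
def cfG (s : List Bool) : Nat := s.countP (fun b => !b)
def DoneG (G : List (List Int)) (r : List Bool) (u : Nat) : Prop :=
  ∀ i, i < G.length → adjG G u i = true → visG r i = true
def ReachG (G : List (List Int)) (a b : Nat) : Prop :=
  Relation.ReflTransGen (fun x y => y < G.length ∧ adjG G x y = true) a b

-- basic getD/set/countP facts
theorem visG_set_self {s : List Bool} {v : Nat} (h : v < s.length) :
    visG (s.set v true) v = true := by
  simp [visG, List.getD, h]

theorem visG_set_ne {s : List Bool} {v j : Nat} (h : j ≠ v) :
    visG (s.set v true) j = visG s j := by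
  simp [visG, List.getD, List.getElem?_set_ne (Ne.symm h)]

theorem visG_set_mono {s : List Bool} {v j : Nat} (h : visG s j = true) :
    visG (s.set v true) j = true := by
  by_cases hj : j = v
  · subst hj
    by_cases hl : j < s.length
    · exact visG_set_self hl
    · rwa [List.set_eq_of_length_le (by omega)]
  · rwa [visG_set_ne hj]

theorem subV_refl (s : List Bool) : SubV s s := fun _ h => h

theorem subV_trans {a b c : List Bool} (h1 : SubV a b) (h2 : SubV b c) : SubV a c :=
  fun j h => h2 j (h1 j h)

theorem done_mono {G : List (List Int)} {r r' : List Bool} {u : Nat}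
    (h : SubV r r') (hd : DoneG G r u) : DoneG G r' u :=
  fun i hi ha => h i (hd i hi ha)

theorem cf_le_length (s : List Bool) : cfG s ≤ s.length := List.countP_le_length

theorem cf_pos {s : List Bool} {v : Nat} (h : v < s.length) (hv : visG s v = false) :
    0 < cfG s := by
  have hmem : false ∈ s := by
    have := List.getD_eq_getElem s false h
    rw [visG] at hv
    rw [hv] at this
    exact this ▸ List.getElem_mem h
  rw [cfG, List.countP_pos_iff]
  exact ⟨false, hmem, rfl⟩

theorem cf_set_lt {s : List Bool} {v : Nat} (h : v < s.length) (hv : visG s v = false) :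
    cfG (s.set v true) < cfG s := by
  induction s generalizing v with
  | nil => simp at h
  | cons a t ih =>
      cases v with
      | zero =>
          have : a = false := hv
          subst this
          simp [cfG]
      | succ v =>
          have h' : v < t.length := by simpa using h
          have hv' : visG t v = false := hv
          have := ih h' hv'
          simp only [List.set_cons_succ, cfG, List.countP_cons]
          simp only [cfG] at this
          omega

theorem cf_mono {s t : List Bool} (hl : s.length = t.length) (h : SubV s t) :
    cfG t ≤ cfG s := by
  induction s generalizing t with
  | nil =>
      cases t with
      | nil => exact le_refl _
      | cons b t' => simp at hl
  | cons a s' ih =>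
      cases t with
      | nil => simp at hl
      | cons b t' =>
          have hl' : s'.length = t'.length := by simpa using hl
          have hsub : SubV s' t' := fun j hj => h (j + 1) hj
          have h0 : a = true → b = true := fun ha => h 0 (by simpa [visG] using ha)
          have := ih hl' hsub
          simp only [cfG, List.countP_cons] at this ⊢
          cases a <;> cases b <;> simp_all <;> omega

theorem visG_replicate (n j : Nat) : visG (List.replicate n false) j = false := by
  induction n generalizing j with
  | zero => rfl
  | succ n ih =>
      cases j with
      | zero => rfl
      | succ j => simpa [visG, List.replicate_succ] using ih j

theorem cf_replicate (n : Nat) : cfG (List.replicate n false) = n := by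
  induction n with
  | zero => rfl
  | succ n ih => simp [cfG, List.replicate_succ] at ih ⊢; omega

theorem all_iff_visG (l : List Bool) :
    (l.all (fun b => b) = true) ↔ ∀ j, j < l.length → visG l j = true := by
  induction l with
  | nil => simp
  | cons a t ih =>
      simp only [List.all_cons, Bool.and_eq_true, ih, List.length_cons]
      constructor
      · rintro ⟨ha, ht⟩ j hj
        cases j with
        | zero => exact ha
        | succ j => exact ht j (by omega)
      · intro hall
        exact ⟨hall 0 (by omega), fun j hj => hall (j + 1) (by omega)⟩

-- ---------- A side ----------

theorem dfsLoopA_len_of {G : List (List Int)} {f v : Nat}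
    (hA : ∀ vis w, (dfsA G f vis w).length = vis.length) :
    ∀ l vis, (dfsLoopA G f v l vis).length = vis.length := by
  intro l
  induction l with
  | nil => intro vis; simp [dfsLoopA]
  | cons i rest ih =>
      intro vis
      rw [dfsLoopA]
      split
      · rw [ih, hA]
      · rw [ih]

theorem dfsA_len {G : List (List Int)} :
    ∀ f vis v, (dfsA G f vis v).length = vis.length := by
  intro f
  induction f with
  | zero => intro vis v; simp [dfsA]
  | succ f ih =>
      intro vis v
      rw [dfsA, dfsLoopA_len_of ih, List.length_set]

theorem dfsLoopA_sub_of {G : List (List Int)} {f v : Nat}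
    (hA : ∀ vis w, SubV vis (dfsA G f vis w)) :
    ∀ l vis, SubV vis (dfsLoopA G f v l vis) := by
  intro l
  induction l with
  | nil => intro vis; simp [dfsLoopA]; exact subV_refl vis
  | cons i rest ih =>
      intro vis
      rw [dfsLoopA]
      split
      · exact subV_trans (hA vis i) (ih _)
      · exact ih vis

theorem dfsA_sub {G : List (List Int)} :
    ∀ f vis v, SubV vis (dfsA G f vis v) := by
  intro f
  induction f with
  | zero => intro vis v; simp [dfsA]; exact subV_refl vis
  | succ f ih =>
      intro vis v
      rw [dfsA]
      exact subV_trans (fun j h => visG_set_mono h) (dfsLoopA_sub_of ih _ _)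

theorem dfsA_mark {G : List (List Int)} {f : Nat} {vis : List Bool} {v : Nat}
    (hf : 1 ≤ f) (hv : v < vis.length) :
    visG (dfsA G f vis v) v = true := by
  obtain ⟨g, rfl⟩ : ∃ g, f = g + 1 := ⟨f - 1, by omega⟩
  rw [dfsA]
  exact dfsLoopA_sub_of (dfsA_sub g) _ _ v (visG_set_self hv)

theorem dfsLoopA_snd_of {G : List (List Int)} {f v : Nat}
    (hA : ∀ vis w j, visG (dfsA G f vis w) j = true →
        visG vis j = true ∨ ReachG G w j) :
    ∀ (l : List Nat), (∀ i ∈ l, i < G.length) → ∀ vis j,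
      visG (dfsLoopA G f v l vis) j = true → visG vis j = true ∨ ReachG G v j := by
  intro l
  induction l with
  | nil => intro _ vis j h; rw [dfsLoopA] at h; exact Or.inl h
  | cons i rest ih =>
      intro hmem vis j h
      rw [dfsLoopA] at h
      rcases ih (fun x hx => hmem x (List.mem_cons_of_mem _ hx)) _ j h with hv' | hr
      · by_cases hc : (adjG G v i && !visG vis i) = true
        · rw [if_pos hc] at hv'
          rcases hA vis i j hv' with h1 | h2
          · exact Or.inl h1
          · refine Or.inr (Relation.ReflTransGen.head ⟨?_, ?_⟩ h2)
            · exact hmem i List.mem_cons_self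
            · exact (Bool.and_eq_true _ _ ▸ hc).1
        · rw [if_neg hc] at hv'
          exact Or.inl hv'
      · exact Or.inr hr

theorem dfsA_snd {G : List (List Int)} :
    ∀ f vis v j, visG (dfsA G f vis v) j = true → visG vis j = true ∨ ReachG G v j := by
  intro f
  induction f with
  | zero => intro vis v j h; rw [dfsA] at h; exact Or.inl h
  | succ f ih =>
      intro vis v j h
      rw [dfsA] at h
      rcases dfsLoopA_snd_of ih _ (fun x hx => List.mem_range.mp hx) _ j h with hv' | hr
      · by_cases hj : j = v
        · subst hj; exact Or.inr Relation.ReflTransGen.refl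
        · rw [visG_set_ne hj] at hv'; exact Or.inl hv'
      · exact Or.inr hr

theorem dfsLoopA_cover {G : List (List Int)} {f v : Nat} (hf : 1 ≤ f) :
    ∀ (l : List Nat) s, (∀ i ∈ l, i < s.length) →
      ∀ i ∈ l, adjG G v i = true → visG (dfsLoopA G f v l s) i = true := by
  intro l
  induction l with
  | nil => intro s _ i hi; simp at hi
  | cons i rest ih =>
      intro s hlen j hj hadj
      rw [dfsLoopA]
      rcases List.mem_cons.mp hj with rfl | hjr
      · refine dfsLoopA_sub_of (dfsA_sub f) rest _ j ?_
        by_cases hc : (adjG G v j && !visG s j) = true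
        · rw [if_pos hc]
          exact dfsA_mark hf (hlen j List.mem_cons_self)
        · rw [if_neg hc]
          rw [Bool.and_eq_true, Bool.not_eq_true'] at hc
          push Not at hc
          simpa using hc hadj
      · refine ih _ ?_ j hjr hadj
        intro x hx
        split
        · rw [dfsA_len]
          exact hlen x (List.mem_cons_of_mem _ hx)
        · exact hlen x (List.mem_cons_of_mem _ hx)

theorem dfsLoopA_closed {G : List (List Int)} {f v : Nat} {P : Nat → Prop}
    (hA : ∀ vis w, vis.length = G.length → w < G.length → visG vis w = false →
        cfG vis < f →
        ∀ u, visG (dfsA G f vis w) u = true →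
          visG vis u = true ∨ DoneG G (dfsA G f vis w) u) :
    ∀ (l : List Nat) s, (∀ i ∈ l, i < G.length) → s.length = G.length → cfG s < f →
      (∀ u, visG s u = true → P u ∨ DoneG G s u) →
      ∀ u, visG (dfsLoopA G f v l s) u = true →
        P u ∨ DoneG G (dfsLoopA G f v l s) u := by
  intro l
  induction l with
  | nil =>
      intro s _ _ _ hbase u hu
      rw [dfsLoopA] at hu ⊢
      exact hbase u hu
  | cons i rest ih =>
      intro s hmem hlen hcf hbase u hu
      rw [dfsLoopA] at hu ⊢
      by_cases hc : (adjG G v i && !visG s i) = true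
      · rw [if_pos hc] at hu ⊢
        have hadj : adjG G v i = true := (Bool.and_eq_true _ _ ▸ hc).1
        have hvisi : visG s i = false := by
          have := (Bool.and_eq_true _ _ ▸ hc).2
          simpa using this
        have hclosed := hA s i hlen (hmem i List.mem_cons_self) hvisi hcf
        refine ih _ (fun x hx => hmem x (List.mem_cons_of_mem _ hx)) ?_ ?_ ?_ u hu
        · rw [dfsA_len]; exact hlen
        · calc cfG (dfsA G f s i) ≤ cfG s := cf_mono (dfsA_len f s i).symm (dfsA_sub f s i)
            _ < f := hcf
        · intro w hw
          rcases hclosed w hw with hws | hwd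
          · rcases hbase w hws with hp | hd
            · exact Or.inl hp
            · exact Or.inr (done_mono (dfsA_sub f s i) hd)
          · exact Or.inr hwd
      · rw [if_neg hc] at hu ⊢
        exact ih _ (fun x hx => hmem x (List.mem_cons_of_mem _ hx)) hlen hcf hbase u hu

theorem dfsA_comp {G : List (List Int)} :
    ∀ f vis v, vis.length = G.length → v < G.length → visG vis v = false →
      cfG vis < f →
      DoneG G (dfsA G f vis v) v ∧
      ∀ u, visG (dfsA G f vis v) u = true →
        visG vis u = true ∨ DoneG G (dfsA G f vis v) u := by
  intro f
  induction f with
  | zero => intro vis v _ _ _ hcf; omega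
  | succ f ih =>
      intro vis v hlen hvlt hv hcf
      have hvl : v < vis.length := by omega
      have hcf1 : 0 < cfG vis := cf_pos hvl hv
      have hf1 : 1 ≤ f := by
        have := cf_set_lt hvl hv
        omega
      have hcf' : cfG (vis.set v true) < f := by
        have := cf_set_lt hvl hv
        omega
      have hlen' : (vis.set v true).length = G.length := by rw [List.length_set]; exact hlen
      have hdone : DoneG G (dfsA G (f + 1) vis v) v := by
        rw [dfsA]
        intro i hi hadj
        refine dfsLoopA_cover hf1 _ _ ?_ i (List.mem_range.mpr hi) hadj
        intro x hx
        rw [List.length_set, hlen]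
        exact List.mem_range.mp hx
      refine ⟨hdone, ?_⟩
      intro u hu
      rw [dfsA] at hu
      have hclosed := dfsLoopA_closed (P := fun w => visG (vis.set v true) w = true)
        (fun vis' w h1 h2 h3 h4 => (ih vis' w h1 h2 h3 h4).2)
        (List.range G.length) _ (fun x hx => List.mem_range.mp hx) hlen' hcf'
        (fun w hw => Or.inl hw) u hu
      rcases hclosed with hp | hd
      · by_cases huv : u = v
        · subst huv; exact Or.inr hdone
        · rw [visG_set_ne huv] at hp; exact Or.inl hp
      · rw [dfsA]
        exact Or.inr hd

theorem dfsA_char {G : List (List Int)} {v : Nat} (hv : v < G.length) :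
    ∀ j, visG (dfsA G (G.length + 1) (List.replicate G.length false) v) j = true ↔
      ReachG G v j := by
  intro j
  have hlen : (List.replicate G.length false).length = G.length := List.length_replicate
  have hcomp := dfsA_comp (G.length + 1) (List.replicate G.length false) v hlen hv
    (visG_replicate _ _) (by rw [cf_replicate]; omega)
  constructor
  · intro h
    rcases dfsA_snd _ _ _ _ h with hv' | hr
    · rw [visG_replicate] at hv'; exact absurd hv' (by simp)
    · exact hr
  · intro h
    have hclosed : ∀ u, visG (dfsA G (G.length + 1) (List.replicate G.length false) v) u = true →
        DoneG G (dfsA G (G.length + 1) (List.replicate G.length false) v) u := by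
      intro u hu
      rcases hcomp.2 u hu with hv' | hd
      · rw [visG_replicate] at hv'; exact absurd hv' (by simp)
      · exact hd
    induction h with
    | refl => exact dfsA_mark (by omega) (by rw [hlen]; exact hv)
    | tail h1 step ih => exact hclosed _ ih _ step.1 step.2

-- ---------- B side ----------

theorem foldB_len {G : List (List Int)} {u : Nat} :
    ∀ (l : List Nat) (st : List Bool × List Nat), ((l.foldl (stepB G u) st).1).length = st.1.length := by
  intro l
  induction l with
  | nil => intro st; rfl
  | cons i rest ih =>
      intro st
      rw [List.foldl_cons, ih]
      unfold stepB
      split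
      · simp
      · rfl

theorem foldB_sub {G : List (List Int)} {u : Nat} :
    ∀ (l : List Nat) (st : List Bool × List Nat), SubV st.1 (l.foldl (stepB G u) st).1 := by
  intro l
  induction l with
  | nil => intro st; exact subV_refl _
  | cons i rest ih =>
      intro st
      rw [List.foldl_cons]
      refine subV_trans ?_ (ih _)
      unfold stepB
      split
      · exact fun j h => visG_set_mono h
      · exact subV_refl _

theorem foldB_nxt_mono {G : List (List Int)} {u : Nat} :
    ∀ (l : List Nat) (st : List Bool × List Nat) x, x ∈ st.2 → x ∈ (l.foldl (stepB G u) st).2 := by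
  intro l
  induction l with
  | nil => intro st x h; exact h
  | cons i rest ih =>
      intro st x h
      rw [List.foldl_cons]
      refine ih _ x ?_
      unfold stepB
      split
      · exact List.mem_append_left _ h
      · exact h

theorem foldB_cf {G : List (List Int)} {u : Nat} :
    ∀ (l : List Nat) (st : List Bool × List Nat), (∀ i ∈ l, i < st.1.length) →
      cfG (l.foldl (stepB G u) st).1 + (l.foldl (stepB G u) st).2.length ≤
        cfG st.1 + st.2.length := by
  intro l
  induction l with
  | nil => intro st _; exact le_refl _
  | cons i rest ih =>
      intro st hmem
      rw [List.foldl_cons]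
      have hstep : cfG (stepB G u st i).1 + (stepB G u st i).2.length ≤ cfG st.1 + st.2.length := by
        unfold stepB
        split
        · rename_i hc
          have hvisi : visG st.1 i = false := by
            have := (Bool.and_eq_true _ _ ▸ hc).2
            simpa using this
          have := cf_set_lt (hmem i List.mem_cons_self) hvisi
          simp only [List.length_append, List.length_cons, List.length_nil]
          omega
        · exact le_refl _
      have hmem' : ∀ x ∈ rest, x < (stepB G u st i).1.length := by
        intro x hx
        unfold stepB
        split
        · simpa using hmem x (List.mem_cons_of_mem _ hx)
        · exact hmem x (List.mem_cons_of_mem _ hx)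
      exact le_trans (ih _ hmem') hstep

theorem foldB_mark_src {G : List (List Int)} {u : Nat} :
    ∀ (l : List Nat) (st : List Bool × List Nat) j, visG (l.foldl (stepB G u) st).1 j = true →
      visG st.1 j = true ∨ (j ∈ l ∧ adjG G u j = true) := by
  intro l
  induction l with
  | nil => intro st j h; exact Or.inl h
  | cons i rest ih =>
      intro st j h
      rw [List.foldl_cons] at h
      rcases ih _ j h with hv | ⟨hm, ha⟩
      · revert hv
        unfold stepB
        split
        · rename_i hc
          intro hv
          by_cases hj : j = i
          · subst hj
            exact Or.inr ⟨List.mem_cons_self, (Bool.and_eq_true _ _ ▸ hc).1⟩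
          · rw [visG_set_ne hj] at hv
            exact Or.inl hv
        · exact fun hv => Or.inl hv
      · exact Or.inr ⟨List.mem_cons_of_mem _ hm, ha⟩

theorem foldB_new_queued {G : List (List Int)} {u : Nat} :
    ∀ (l : List Nat) (st : List Bool × List Nat) j, visG (l.foldl (stepB G u) st).1 j = true →
      visG st.1 j = true ∨ j ∈ (l.foldl (stepB G u) st).2 := by
  intro l
  induction l with
  | nil => intro st j h; exact Or.inl h
  | cons i rest ih =>
      intro st j h
      rw [List.foldl_cons] at h ⊢
      rcases ih _ j h with hv | hq
      · revert hv
        unfold stepB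
        split
        · intro hv
          by_cases hj : j = i
          · subst hj
            refine Or.inr (foldB_nxt_mono rest _ j ?_)
            exact List.mem_append_right _ List.mem_cons_self
          · rw [visG_set_ne hj] at hv
            exact Or.inl hv
        · exact fun hv => Or.inl hv
      · exact Or.inr hq

theorem foldB_queued_src {G : List (List Int)} {u : Nat} :
    ∀ (l : List Nat) (st : List Bool × List Nat), (∀ i ∈ l, i < st.1.length) →
      ∀ j, j ∈ (l.foldl (stepB G u) st).2 →
      j ∈ st.2 ∨ visG (l.foldl (stepB G u) st).1 j = true := by
  intro l
  induction l with
  | nil => intro st _ j h; exact Or.inl h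
  | cons i rest ih =>
      intro st hmem j h
      rw [List.foldl_cons] at h ⊢
      have hmem' : ∀ x ∈ rest, x < (stepB G u st i).1.length := by
        intro x hx
        unfold stepB
        split
        · simpa using hmem x (List.mem_cons_of_mem _ hx)
        · exact hmem x (List.mem_cons_of_mem _ hx)
      rcases ih _ hmem' j h with hq | hv
      · revert hq
        unfold stepB
        split
        · intro hq
          rcases List.mem_append.mp hq with h1 | h2
          · exact Or.inl h1
          · have hj : j = i := by simpa using h2
            subst hj
            refine Or.inr (foldB_sub rest _ j ?_)
            show visG (st.1.set j true) j = true
            exact visG_set_self (hmem j List.mem_cons_self)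
        · exact fun hq => Or.inl hq
      · exact Or.inr hv

theorem foldB_cover {G : List (List Int)} {u : Nat} :
    ∀ (l : List Nat) (st : List Bool × List Nat), (∀ i ∈ l, i < st.1.length) →
      ∀ j ∈ l, adjG G u j = true → visG (l.foldl (stepB G u) st).1 j = true := by
  intro l
  induction l with
  | nil => intro st _ j hj; simp at hj
  | cons i rest ih =>
      intro st hmem j hj hadj
      rw [List.foldl_cons]
      have hmem' : ∀ x ∈ rest, x < (stepB G u st i).1.length := by
        intro x hx
        unfold stepB
        split
        · simpa using hmem x (List.mem_cons_of_mem _ hx)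
        · exact hmem x (List.mem_cons_of_mem _ hx)
      rcases List.mem_cons.mp hj with rfl | hjr
      · refine foldB_sub rest _ j ?_
        unfold stepB
        split
        · exact visG_set_self (hmem j List.mem_cons_self)
        · rename_i hc
          rw [Bool.and_eq_true, Bool.not_eq_true'] at hc
          push Not at hc
          simpa using hc hadj
      · exact ih _ hmem' j hjr hadj

-- round-level consequences (fold of innerB over the frontier)
theorem roundB_len {G : List (List Int)} :
    ∀ (fr : List Nat) (st : List Bool × List Nat), ((fr.foldl (innerB G) st).1).length = st.1.length := by
  intro fr
  induction fr with
  | nil => intro st; rfl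
  | cons u rest ih =>
      intro st
      rw [List.foldl_cons, ih]
      exact foldB_len _ _

theorem roundB_sub {G : List (List Int)} :
    ∀ (fr : List Nat) (st : List Bool × List Nat), SubV st.1 (fr.foldl (innerB G) st).1 := by
  intro fr
  induction fr with
  | nil => intro st; exact subV_refl _
  | cons u rest ih =>
      intro st
      rw [List.foldl_cons]
      exact subV_trans (foldB_sub _ _) (ih _)

theorem roundB_nxt_mono {G : List (List Int)} :
    ∀ (fr : List Nat) (st : List Bool × List Nat) x, x ∈ st.2 → x ∈ (fr.foldl (innerB G) st).2 := by
  intro fr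
  induction fr with
  | nil => intro st x h; exact h
  | cons u rest ih =>
      intro st x h
      rw [List.foldl_cons]
      exact ih _ x (foldB_nxt_mono _ _ x h)

theorem roundB_cf {G : List (List Int)} :
    ∀ (fr : List Nat) (st : List Bool × List Nat), st.1.length = G.length →
      cfG (fr.foldl (innerB G) st).1 + (fr.foldl (innerB G) st).2.length ≤
        cfG st.1 + st.2.length := by
  intro fr
  induction fr with
  | nil => intro st _; exact le_refl _
  | cons u rest ih =>
      intro st hlen
      rw [List.foldl_cons]
      have h1 : cfG (innerB G st u).1 + (innerB G st u).2.length ≤ cfG st.1 + st.2.length :=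
        foldB_cf _ _ (fun i hi => by rw [hlen]; exact List.mem_range.mp hi)
      have h2 := ih (innerB G st u) (by rw [innerB, foldB_len]; exact hlen)
      omega

theorem roundB_mark_src {G : List (List Int)} :
    ∀ (fr : List Nat) (st : List Bool × List Nat) j, visG (fr.foldl (innerB G) st).1 j = true →
      visG st.1 j = true ∨ ∃ u ∈ fr, j < G.length ∧ adjG G u j = true := by
  intro fr
  induction fr with
  | nil => intro st j h; exact Or.inl h
  | cons u rest ih =>
      intro st j h
      rw [List.foldl_cons] at h
      rcases ih _ j h with hv | ⟨w, hw, hj⟩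
      · rcases foldB_mark_src _ _ j hv with h1 | ⟨h2, h3⟩
        · exact Or.inl h1
        · exact Or.inr ⟨u, List.mem_cons_self, List.mem_range.mp h2, h3⟩
      · exact Or.inr ⟨w, List.mem_cons_of_mem _ hw, hj⟩

theorem roundB_new_queued {G : List (List Int)} :
    ∀ (fr : List Nat) (st : List Bool × List Nat) j, visG (fr.foldl (innerB G) st).1 j = true →
      visG st.1 j = true ∨ j ∈ (fr.foldl (innerB G) st).2 := by
  intro fr
  induction fr with
  | nil => intro st j h; exact Or.inl h
  | cons u rest ih =>
      intro st j h
      rw [List.foldl_cons] at h ⊢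
      rcases ih _ j h with hv | hq
      · rcases foldB_new_queued _ _ j hv with h1 | h2
        · exact Or.inl h1
        · exact Or.inr (roundB_nxt_mono _ _ j h2)
      · exact Or.inr hq

theorem roundB_queued_marked {G : List (List Int)} :
    ∀ (fr : List Nat) (st : List Bool × List Nat), st.1.length = G.length →
      ∀ j, j ∈ (fr.foldl (innerB G) st).2 →
      j ∈ st.2 ∨ visG (fr.foldl (innerB G) st).1 j = true := by
  intro fr
  induction fr with
  | nil => intro st _ j h; exact Or.inl h
  | cons u rest ih =>
      intro st hlen j h
      rw [List.foldl_cons] at h ⊢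
      have hlen' : (innerB G st u).1.length = G.length := by rw [innerB, foldB_len]; exact hlen
      rcases ih _ hlen' j h with hq | hv
      · rcases foldB_queued_src _ _ (fun i hi => by rw [hlen]; exact List.mem_range.mp hi) j hq with h1 | h2
        · exact Or.inl h1
        · exact Or.inr (roundB_sub _ _ j h2)
      · exact Or.inr hv

theorem roundB_done {G : List (List Int)} :
    ∀ (fr : List Nat) (st : List Bool × List Nat), st.1.length = G.length →
      ∀ u ∈ fr, DoneG G (fr.foldl (innerB G) st).1 u := by
  intro fr
  induction fr with
  | nil => intro st _ u hu; simp at hu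
  | cons w rest ih =>
      intro st hlen u hu
      rw [List.foldl_cons]
      have hlen' : (innerB G st w).1.length = G.length := by rw [innerB, foldB_len]; exact hlen
      rcases List.mem_cons.mp hu with rfl | hur
      · refine done_mono (roundB_sub rest _) ?_
        intro i hi hadj
        exact foldB_cover _ _ (fun x hx => by rw [hlen]; exact List.mem_range.mp hx) i
          (List.mem_range.mpr hi) hadj
      · exact ih _ hlen' u hur

def InvB (G : List (List Int)) (s : Nat) (seen : List Bool) (fr : List Nat) : Prop :=
  seen.length = G.length ∧ visG seen s = true ∧
  (∀ u ∈ fr, visG seen u = true) ∧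
  (∀ j, visG seen j = true → ReachG G s j) ∧
  (∀ u, visG seen u = true → u ∈ fr ∨ DoneG G seen u)

theorem invB_nil_char {G : List (List Int)} {s : Nat} {seen : List Bool}
    (hinv : InvB G s seen []) : ∀ j, visG seen j = true ↔ ReachG G s j := by
  obtain ⟨_, hs, _, hsnd, hpend⟩ := hinv
  intro j
  constructor
  · exact hsnd j
  · intro h
    induction h with
    | refl => exact hs
    | tail h1 step ih =>
        rcases hpend _ ih with hmem | hdone
        · simp at hmem
        · exact hdone _ step.1 step.2

theorem bfsB_char {G : List (List Int)} {s : Nat} :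
    ∀ f seen fr, InvB G s seen fr → (fr = [] ∨ cfG seen < f) →
      ∀ j, visG (bfsB G f seen fr) j = true ↔ ReachG G s j := by
  intro f
  induction f with
  | zero =>
      intro seen fr hinv hfuel
      cases fr with
      | nil => exact invB_nil_char hinv
      | cons u rest =>
          rcases hfuel with h | h
          · simp at h
          · omega
  | succ f ih =>
      intro seen fr hinv hfuel
      cases fr with
      | nil => exact invB_nil_char hinv
      | cons u rest =>
          obtain ⟨hlen, hs, hfr, hsnd, hpend⟩ := hinv
          have hlen0 : ((seen, ([] : List Nat)) : List Bool × List Nat).1.length = G.length := hlen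
          have hstfold : bfsRound G (u :: rest) seen = (u :: rest).foldl (innerB G) (seen, []) := by
            rw [bfsRound]
          have hsub : SubV seen (bfsRound G (u :: rest) seen).1 := by
            rw [hstfold]; exact roundB_sub (u :: rest) (seen, [])
          have hlen' : (bfsRound G (u :: rest) seen).1.length = G.length := by
            rw [hstfold, roundB_len]; exact hlen
          have hdone : ∀ x ∈ (u :: rest), DoneG G (bfsRound G (u :: rest) seen).1 x := by
            rw [hstfold]
            exact roundB_done _ _ hlen0
          have hinv' : InvB G s (bfsRound G (u :: rest) seen).1 (bfsRound G (u :: rest) seen).2 := by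
            refine ⟨hlen', hsub _ hs, ?_, ?_, ?_⟩
            · intro x hx
              rw [hstfold] at hx ⊢
              rcases roundB_queued_marked _ _ hlen0 x hx with h1 | h2
              · simp at h1
              · exact h2
            · intro j hj
              rw [hstfold] at hj
              rcases roundB_mark_src _ _ j hj with h1 | ⟨w, hw, hjn, hadj⟩
              · exact hsnd j h1
              · exact Relation.ReflTransGen.tail (hsnd w (hfr w hw)) ⟨hjn, hadj⟩
            · intro x hx
              rw [hstfold] at hx
              rcases roundB_new_queued _ _ x hx with h1 | h2
              · rcases hpend x h1 with hm | hd
                · exact Or.inr (hdone x hm)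
                · exact Or.inr (done_mono hsub hd)
              · left
                rw [hstfold]
                exact h2
          have hfuel' : (bfsRound G (u :: rest) seen).2 = [] ∨ cfG (bfsRound G (u :: rest) seen).1 < f := by
            rcases Decidable.em ((bfsRound G (u :: rest) seen).2 = []) with h | h
            · exact Or.inl h
            · right
              have hcf : cfG (bfsRound G (u :: rest) seen).1 + (bfsRound G (u :: rest) seen).2.length ≤ cfG seen := by
                have h0 := roundB_cf (u :: rest) (seen, ([] : List Nat)) hlen0
                rw [← hstfold] at h0
                simpa using h0
              have hlen2 : 1 ≤ (bfsRound G (u :: rest) seen).2.length := by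
                cases hq : (bfsRound G (u :: rest) seen).2 with
                | nil => exact absurd hq h
                | cons a b => simp
              have hcfseen : cfG seen < f + 1 := by
                rcases hfuel with h' | h'
                · simp at h'
                · exact h'
              omega
          intro j
          rw [bfsB]
          exact ih _ _ hinv' hfuel' j

theorem bfsB_len {G : List (List Int)} :
    ∀ f seen fr, (bfsB G f seen fr).length = seen.length := by
  intro f
  induction f with
  | zero => intro seen fr; cases fr <;> rfl
  | succ f ih =>
      intro seen fr
      cases fr with
      | nil => rfl
      | cons u rest =>
          rw [bfsB, ih, bfsRound]
          exact roundB_len _ _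

theorem bfsB_char_init {G : List (List Int)} {s : Nat} (hs : s < G.length) :
    ∀ j, visG (bfsB G (G.length + 1) ((List.replicate G.length false).set s true) [s]) j = true ↔
      ReachG G s j := by
  intro j
  have hlenr : (List.replicate G.length false).length = G.length := List.length_replicate
  have hlen0 : ((List.replicate G.length false).set s true).length = G.length := by
    rw [List.length_set]; exact hlenr
  have hmark : visG ((List.replicate G.length false).set s true) s = true :=
    visG_set_self (by rw [hlenr]; exact hs)
  refine bfsB_char (G.length + 1) _ [s] ⟨hlen0, hmark, ?_, ?_, ?_⟩ (Or.inr ?_) j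
  · intro u hu
    have : u = s := by simpa using hu
    subst this
    exact hmark
  · intro i hi
    by_cases his : i = s
    · subst his; exact Relation.ReflTransGen.refl
    · rw [visG_set_ne his, visG_replicate] at hi
      simp at hi
  · intro x hx
    by_cases hxs : x = s
    · subst hxs; exact Or.inl List.mem_cons_self
    · rw [visG_set_ne hxs, visG_replicate] at hx
      simp at hx
  · have := cf_le_length ((List.replicate G.length false).set s true)
    rw [hlen0] at this
    omega

-- ---------- assembling ----------

theorem check_eq {G : List (List Int)} {s : Nat} (hs : s < G.length) :
    (dfsA G (G.length + 1) (List.replicate G.length false) s).all (fun b => b) =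
    (bfsB G (G.length + 1) ((List.replicate G.length false).set s true) [s]).all (fun b => b) := by
  have hA := dfsA_char hs
  have hB := bfsB_char_init hs
  have hlenA : (dfsA G (G.length + 1) (List.replicate G.length false) s).length = G.length := by
    rw [dfsA_len, List.length_replicate]
  have hlenB : (bfsB G (G.length + 1) ((List.replicate G.length false).set s true) [s]).length
      = G.length := by
    rw [bfsB_len, List.length_set, List.length_replicate]
  have hiff : ((dfsA G (G.length + 1) (List.replicate G.length false) s).all (fun b => b) = true)
      ↔ ((bfsB G (G.length + 1) ((List.replicate G.length false).set s true) [s]).all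
          (fun b => b) = true) := by
    rw [all_iff_visG, all_iff_visG, hlenA, hlenB]
    constructor
    · intro h j hj
      exact (hB j).mpr ((hA j).mp (h j hj))
    · intro h j hj
      exact (hA j).mpr ((hB j).mp (h j hj))
  cases h1 : (dfsA G (G.length + 1) (List.replicate G.length false) s).all (fun b => b) <;>
    cases h2 : (bfsB G (G.length + 1) ((List.replicate G.length false).set s true) [s]).all
      (fun b => b) <;> simp_all

theorem go_eq {G : List (List Int)} :
    ∀ (l : List Nat), (∀ i ∈ l, i < G.length) → goA G l = goB G l := by
  intro l
  induction l with
  | nil => intro _; rfl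
  | cons i rest ih =>
      intro hmem
      rw [goA, goB, ← check_eq (hmem i List.mem_cons_self)]
      split
      · rfl
      · exact ih (fun x hx => hmem x (List.mem_cons_of_mem _ hx))

-- ===== VERDICT (by name: the statement is the Claim_ definition above) =====
theorem goodStart_spec : Claim_equal_goodStart := by
  intro G _ _
  unfold Spec_goodStart goodStart goodStart_alt
  exact go_eq _ (fun i hi => List.mem_range.mp hi)
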